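-- pv_equiv track=rewrite | github.com/jacob13jacob13/myself- | Codesignal/shapeArea.py | shapeArea
-- ===== SOURCE A (Python) =====
-- def shapeArea(n):
--     if n == 1:
--         return n
--     else :
--         x = 1
--         for i in range(1,n):
--             a = x + 4 * i
--             x = a
--         return x
-- ===== SOURCE B (Python) =====
-- def shapeArea(n):
--     return 2 * n * (n - 1) + 1
-- ===== Notes on version B (the rewrite author's own statement) =====
-- stated objective: faster
-- what changed: Replaced the O(n) accumulation loop over range(1,n) with the closed-form formula 2*n*(n-1)+1.
-- outside the precondition, e.g. on shapeArea(-2): A returns 1, B returns 13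
import Mathlib
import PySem

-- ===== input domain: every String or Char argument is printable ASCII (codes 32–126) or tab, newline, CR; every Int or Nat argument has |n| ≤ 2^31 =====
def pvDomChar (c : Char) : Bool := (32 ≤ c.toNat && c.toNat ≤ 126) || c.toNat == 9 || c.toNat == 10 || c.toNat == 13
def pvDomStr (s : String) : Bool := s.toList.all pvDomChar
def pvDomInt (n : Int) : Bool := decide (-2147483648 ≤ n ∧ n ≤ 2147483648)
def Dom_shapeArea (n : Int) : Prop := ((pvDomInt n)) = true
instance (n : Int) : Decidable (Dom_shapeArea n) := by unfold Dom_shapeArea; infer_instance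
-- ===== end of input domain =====

-- B replaces A's O(n) accumulation loop with the closed form 2*n*(n-1)+1 (faster, asymptotic).

-- ===== PORT A =====
def shapeArea (n : Int) : Int :=
  if n == 1 then n
  else (PySem.List.pyRange 1 n 1).foldl (fun x i => x + 4 * i) 1

-- ===== PORT B =====
def shapeArea_alt (n : Int) : Int := 2 * n * (n - 1) + 1

-- ===== PRECONDITION & SPEC =====
-- Pre_ excludes negative n, where no layered shape exists and neither value is
-- specified: there A's empty loop leaves its initial accumulator while B still
-- evaluates its formula — both arbitrary on a meaningless input (see cites).
def Pre_shapeArea (n : Int) : Prop := 0 ≤ n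
instance (n : Int) : Decidable (Pre_shapeArea n) := by unfold Pre_shapeArea; infer_instance
def pvWitness_shapeArea : Int := (3)
def Spec_shapeArea (n : Int) (out : Int) : Prop := out = shapeArea_alt n
instance (n : Int) (out : Int) : Decidable (Spec_shapeArea n out) := by unfold Spec_shapeArea; infer_instance

-- ===== CLAIM (what is proved, stated in full; the proofs are below) =====
def Claim_equal_shapeArea : Prop := ∀ (n : Int), Dom_shapeArea n → Pre_shapeArea n → Spec_shapeArea n (shapeArea n)

-- ===== LEMMAS AND PROOFS =====
theorem shapeArea_loop (n : Int) (h : 0 ≤ n) :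
    (PySem.List.pyRange 1 n 1).foldl (fun x i => x + 4 * i) 1 = 2 * n * (n - 1) + 1 := by
  induction n, h using Int.le_induction with
  | base => rw [PySem.List.pyRange_one_eq_nil (by norm_num)]; simp
  | succ m hm ih =>
      rcases eq_or_lt_of_le hm with h0 | h1
      · rw [PySem.List.pyRange_one_eq_nil (by omega)]; simp; omega
      · rw [PySem.List.pyRange_one_succ_right (by omega), List.foldl_append, ih]
        simp; ring

-- ===== VERDICT (by name: the statement is the Claim_ definition above) =====
theorem shapeArea_spec : Claim_equal_shapeArea := by
  intro n _ hp
  unfold Spec_shapeArea shapeArea shapeArea_alt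
  split
  · next h => simp at h; subst h; ring
  · exact shapeArea_loop n hp
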